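-- pv_equiv track=rewrite | github.com/jasperhordijk09/jascarwash | api/src/lib/vehicleInfo.py | dashLicensePlate
-- ===== SOURCE A (Python) =====
-- def dashLicensePlate(license_plate: str) -> str:
--     newLicensePlate = ""
--
--     lastCharIsdigit = None
--     for char in license_plate:
--         if char.isdigit() != lastCharIsdigit:
--             newLicensePlate += "-"
--             lastCharIsdigit = char.isdigit()
--         newLicensePlate += char
--     newLicensePlate = newLicensePlate.strip("-")
--     parts = []
--     for part in newLicensePlate.split("-"):
--         if len(part) == 4:
--             parts.append(part[:2])
--             parts.append(part[2:])
--         else: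
--             parts.append(part)
--     newLicensePlate = "-".join(parts)
--     return newLicensePlate
-- ===== SOURCE B (Python) =====
-- def dashLicensePlate(license_plate: str) -> str:
--     # Index-arithmetic algorithm: no split/parts pipeline and no run lists.
--     # First mark every digit/non-digit boundary with a dash (pairwise zip),
--     # trim edge dashes, then emit the result char by char, deciding with an
--     # O(1) local window test whether an extra dash goes before position j
--     # (j is the midpoint of a maximal dash-free block of length exactly 4).
--     s = license_plate
--     if not s:
--         return ""
--     t = s[0] + "".join(("-" + c) if c.isdigit() != p.isdigit() else c
--                        for p, c in zip(s, s[1:]))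
--     t = t.strip("-")
--     n = len(t)
--     out = ""
--     for j in range(n):
--         if (j >= 2 and j + 2 <= n
--                 and "-" not in t[j - 2:j + 2]
--                 and (j == 2 or t[j - 3] == "-")
--                 and (j + 2 == n or t[j + 2] == "-")):
--             out += "-"
--         out += t[j]
--     return out
-- ===== Notes on version B (the rewrite author's own statement) =====
-- stated objective: alternative
-- what changed: A builds a sentinel-dashed string, strips it, splits it into a parts list and rebuilds split 4-runs with join; B never materializes parts: it marks boundaries by pairwise zip comparison and then emits the string in one index pass, deciding each extra mid-run dash with an O(1) local window test on indices.
import Mathlib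
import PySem

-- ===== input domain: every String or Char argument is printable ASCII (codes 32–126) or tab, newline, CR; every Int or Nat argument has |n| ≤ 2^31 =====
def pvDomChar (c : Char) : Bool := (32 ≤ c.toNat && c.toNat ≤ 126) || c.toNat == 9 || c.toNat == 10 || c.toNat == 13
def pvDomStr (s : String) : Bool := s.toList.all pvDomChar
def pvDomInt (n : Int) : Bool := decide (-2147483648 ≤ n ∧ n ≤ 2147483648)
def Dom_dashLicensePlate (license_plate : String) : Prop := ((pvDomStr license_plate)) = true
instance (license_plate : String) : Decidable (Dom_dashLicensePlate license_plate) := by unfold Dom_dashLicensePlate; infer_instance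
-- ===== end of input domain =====

-- B replaces A's strip/split/parts-list/join pipeline by a single index pass with an O(1)
-- local window test deciding where the extra mid-run dash goes (objective: alternative).

-- ===== PORT A =====
-- one iteration of A's first for-loop; state = (newLicensePlate, lastCharIsdigit)
-- (the Python str built by += is ported as a List Char built by ++; char.isdigit() is
-- PySem.Chars.isdigit, exact on the ASCII domain)
def stepA (st : List Char × Option Bool) (c : Char) : List Char × Option Bool :=
  let d := PySem.Chars.isdigit c
  if some d ≠ st.2 then (st.1 ++ ['-'] ++ [c], some d) else (st.1 ++ [c], st.2)

-- one iteration of A's second for-loop (parts.append); part[:2]/part[2:] are PySem slices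
def partsStepA (acc : List (List Char)) (part : List Char) : List (List Char) :=
  if part.length = 4 then
    acc ++ [PySem.List.slice part none (some 2), PySem.List.slice part (some 2) none]
  else acc ++ [part]

def dashLicensePlate (license_plate : String) : String :=
  let st := license_plate.toList.foldl stepA ([], none)
  let stripped := PySem.Chars.stripChars st.1 ['-']          -- .strip("-")
  let parts := (PySem.Chars.splitOn stripped ['-']).foldl partsStepA []   -- .split("-") (sep ≠ "")
  String.ofList (PySem.Chars.join ['-'] parts)                   -- "-".join(parts)

-- ===== PORT B =====
-- Source B's window test for index j of t: insert a dash before t[j] iff j is the midpoint of a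
-- maximal dash-free block of length exactly 4.  '-' not in t[j-2:j+2] is the substring test
-- '-' in str (PySem.Chars.isIn on a slice); t[j-3] == '-' / t[j+2] == '-' are guarded
-- indexings, ported as pyGet? compared with some '-' (the guards make them in range in Python).
def cutB (t : List Char) (j : Int) : Bool :=
  decide (2 ≤ j) && decide (j + 2 ≤ (t.length : Int)) &&
  !(PySem.Chars.isIn ['-'] (PySem.List.slice t (some (j - 2)) (some (j + 2)))) &&
  (decide (j = 2) || (PySem.List.pyGet? t (j - 3) == some '-')) &&
  (decide (j + 2 = (t.length : Int)) || (PySem.List.pyGet? t (j + 2) == some '-'))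

-- Source B: the comprehension over zip(s, s[1:]) joined by "" (PySem.Chars.join [] of the mapped
-- pieces), then strip('-'), then the index loop over range(n) building out.
def dashLicensePlate_alt (license_plate : String) : String :=
  match license_plate.toList with
  | [] => ""                                                   -- if not s: return ""
  | c0 :: rest =>
    let t0 := c0 :: PySem.Chars.join [] (((c0 :: rest).zip rest).map
        (fun pc => if PySem.Chars.isdigit pc.2 ≠ PySem.Chars.isdigit pc.1
                   then ['-', pc.2] else [pc.2]))
    let t := PySem.Chars.stripChars t0 ['-']                   -- t.strip("-")
    let n : Int := (t.length : Int)
    let out := (PySem.List.pyRange 0 n 1).foldl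
        (fun out j => (if cutB t j then out ++ ['-'] else out)
                        ++ [PySem.List.pyGetD t j ' ']) []     -- out += t[j] (j in range(n))
    String.ofList out

-- ===== PRECONDITION & SPEC =====
def Spec_dashLicensePlate (license_plate : String) (out : String) : Prop := out = dashLicensePlate_alt license_plate
instance (license_plate : String) (out : String) : Decidable (Spec_dashLicensePlate license_plate out) := by unfold Spec_dashLicensePlate; infer_instance

-- ===== CLAIM (what is proved, stated in full; the proofs are below) =====
def Claim_equal_dashLicensePlate : Prop := ∀ (license_plate : String), Dom_dashLicensePlate license_plate → Spec_dashLicensePlate license_plate (dashLicensePlate license_plate)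

-- ===== LEMMAS AND PROOFS =====

-- the boundary-dashed core of c::cs (dashes inserted at digit/non-digit changes), b = type of
-- the previous character
def ext (b : Bool) : List Char → List Char
  | [] => []
  | c :: cs =>
    (if PySem.Chars.isdigit c ≠ b then ['-', c] else [c]) ++ ext (PySem.Chars.isdigit c) cs

-- the running last_is_digit value after the characters
def lastD (b : Bool) : List Char → Bool
  | [] => b
  | c :: cs => lastD (PySem.Chars.isdigit c) cs

-- recursive specification of str.split("-")
def spl : List Char → List (List Char)
  | [] => [[]]
  | c :: t => if c = '-' then [] :: spl t else (c :: (spl t).headD []) :: (spl t).tail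

-- "-".join at list level, in the recursion shape the proofs use
def joinD : List (List Char) → List Char
  | [] => []
  | [r] => r
  | r :: s :: t => r ++ '-' :: joinD (s :: t)

-- the 4-split of one part
def step4 (p : List Char) : List (List Char) :=
  if p.length = 4 then [p.take 2, p.drop 2] else [p]

-- B's second pass at Nat level
def wp (u : List Char) : List Char :=
  (List.range u.length).flatMap
    (fun (j : Nat) => (if cutB u (j : Int) then ['-'] else []) ++ [u.getD j ' '])

theorem foldlA (cs : List Char) : ∀ (acc : List Char) (b : Bool),
    cs.foldl stepA (acc, some b) = (acc ++ ext b cs, some (lastD b cs)) := by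
  induction cs with
  | nil => intro acc b; simp [ext, lastD]
  | cons c cs ih =>
    intro acc b
    by_cases h : PySem.Chars.isdigit c = b
    · simp [stepA, ext, lastD, h, ih]
    · simp [stepA, ext, lastD, h, ih]

theorem join_nil_eq_flatten (L : List (List Char)) : PySem.Chars.join [] L = L.flatten := by
  induction L with
  | nil => simp [PySem.Chars.join_nil]
  | cons x L ih =>
    cases L with
    | nil => simp [PySem.Chars.join_singleton]
    | cons y t => simp [PySem.Chars.join_cons_cons, ih]

theorem zip_join (cs : List Char) : ∀ (p : Char),
    PySem.Chars.join [] (((p :: cs).zip cs).map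
      (fun pc => if PySem.Chars.isdigit pc.2 ≠ PySem.Chars.isdigit pc.1
                 then ['-', pc.2] else [pc.2]))
      = ext (PySem.Chars.isdigit p) cs := by
  induction cs with
  | nil => intro p; simp [ext, PySem.Chars.join_nil]
  | cons c cs ih =>
    intro p
    simp only [List.zip_cons_cons, List.map_cons, join_nil_eq_flatten, List.flatten_cons, ext]
    rw [← join_nil_eq_flatten, ih c]

theorem strip_dash_cons (x : List Char) :
    PySem.Chars.stripChars ('-' :: x) ['-'] = PySem.Chars.stripChars x ['-'] := by
  simp [PySem.Chars.stripChars, List.dropWhile]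

theorem spl_ne_nil (l : List Char) : spl l ≠ [] := by
  induction l with
  | nil => simp [spl]
  | cons c t ih =>
    by_cases h : c = '-' <;> simp [spl, h]

theorem spl_no_dash (r : List Char) (h : '-' ∉ r) : spl r = [r] := by
  induction r with
  | nil => simp [spl]
  | cons c t ih =>
    simp only [List.mem_cons, not_or] at h
    rw [spl, if_neg (fun hc => h.1 hc.symm), ih h.2]
    simp

theorem spl_append_sep (b l : List Char) (h : '-' ∉ b) :
    spl (b ++ '-' :: l) = b :: spl l := by
  induction b with
  | nil => simp [spl]
  | cons c t ih =>
    simp only [List.mem_cons, not_or] at h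
    simp only [List.cons_append]
    rw [spl, if_neg (fun hc => h.1 hc.symm), ih h.2]
    have := spl_ne_nil l
    rcases hs : spl l with _ | ⟨x, xs⟩
    · exact absurd hs this
    · simp

theorem splitOn_go_dash (fuel : Nat) : ∀ (l : List Char), l.length < fuel → ∀ cur acc,
    PySem.Chars.splitOn.go ['-'] fuel l cur acc
      = acc.reverse ++ ((cur.reverse ++ (spl l).headD []) :: (spl l).tail) := by
  induction fuel with
  | zero => intro l hl; omega
  | succ fuel ih =>
    intro l hl cur acc
    cases l with
    | nil => simp [PySem.Chars.splitOn.go, spl]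
    | cons c rest =>
      by_cases hc : c = '-'
      · subst hc
        rw [PySem.Chars.splitOn.go]
        have hpre : List.isPrefixOf ['-'] ('-' :: rest) = true := by simp [List.isPrefixOf]
        rw [if_pos hpre]
        simp only [List.length_cons] at hl
        simp only [List.length_cons, List.length_nil, List.drop_succ_cons, List.drop_zero]
        rw [ih rest (by omega) [] (cur.reverse :: acc)]
        have := spl_ne_nil rest
        rcases hs : spl rest with _ | ⟨x, xs⟩
        · exact absurd hs this
        · simp [spl, hs]
      · rw [PySem.Chars.splitOn.go]
        have hpre : List.isPrefixOf ['-'] (c :: rest) = false := by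
          simp [List.isPrefixOf]; exact fun hc' => hc hc'.symm
        rw [if_neg (by simp [hpre])]
        simp only [List.length_cons] at hl
        rw [ih rest (by omega) (c :: cur) acc]
        simp [spl, hc]

theorem splitOn_dash (l : List Char) : PySem.Chars.splitOn l ['-'] = spl l := by
  rw [PySem.Chars.splitOn, splitOn_go_dash (l.length + 1) l (by omega) [] []]
  have h1 := spl_ne_nil l
  rcases hs : spl l with _ | ⟨x, xs⟩
  · exact absurd hs h1
  · simp

theorem joinD_eq_join (L : List (List Char)) : PySem.Chars.join ['-'] L = joinD L := by
  induction L with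
  | nil => simp [PySem.Chars.join_nil, joinD]
  | cons x L ih =>
    cases L with
    | nil => simp [PySem.Chars.join_singleton, joinD]
    | cons y t => simp [PySem.Chars.join_cons_cons, joinD, ih]

theorem joinD_append (X Y : List (List Char)) (hX : X ≠ []) (hY : Y ≠ []) :
    joinD (X ++ Y) = joinD X ++ '-' :: joinD Y := by
  induction X with
  | nil => exact absurd rfl hX
  | cons x X ih =>
    cases X with
    | nil =>
      rcases Y with _ | ⟨y, ys⟩
      · exact absurd rfl hY
      · simp [joinD]
    | cons x2 X2 =>
      have : joinD (x :: x2 :: X2 ++ Y) = x ++ '-' :: joinD (x2 :: X2 ++ Y) := by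
        rcases X2 ++ Y with _ | _ <;> simp [joinD]
      rw [List.cons_append] at this ⊢
      rw [this, ih (by simp) , joinD]
      simp

theorem step4_ne_nil (p : List Char) : step4 p ≠ [] := by
  unfold step4; split <;> simp

theorem flat_spl_ne_nil (l : List Char) : (spl l).flatMap step4 ≠ [] := by
  have h1 := spl_ne_nil l
  rcases hs : spl l with _ | ⟨x, xs⟩
  · exact absurd hs h1
  · have := step4_ne_nil x
    simp only [List.flatMap_cons]
    intro h
    exact this (List.append_eq_nil_iff.mp h).1

theorem joinD_step4 (p : List Char) :
    joinD (step4 p) = if p.length = 4 then p.take 2 ++ '-' :: p.drop 2 else p := by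
  unfold step4
  split <;> simp [joinD]

theorem foldl_parts (L : List (List Char)) :
    L.foldl partsStepA [] = L.flatMap step4 := by
  have h : ∀ (acc : List (List Char)), L.foldl partsStepA acc = acc ++ L.flatMap step4 := by
    induction L with
    | nil => intro acc; simp
    | cons p L ih =>
      intro acc
      simp only [List.foldl_cons, List.flatMap_cons, ih]
      unfold partsStepA step4
      split <;> simp [PySem.List.slice_to, PySem.List.slice_from]
  simpa using h []

theorem isIn_single (w : List Char) : PySem.Chars.isIn ['-'] w = w.contains '-' := by
  by_cases h : '-' ∈ w
  · have h1 : PySem.Chars.isIn ['-'] w = true :=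
      (PySem.Chars.isIn_iff_infix _ _).mpr ((List.singleton_infix_iff _ _).mpr h)
    have h2 : w.contains '-' = true := by simpa using h
    rw [h1, h2]
  · have h1 : PySem.Chars.isIn ['-'] w = false :=
      (PySem.Chars.isIn_eq_false_iff _ _).mpr (fun hi => h ((List.singleton_infix_iff _ _).mp hi))
    have h2 : w.contains '-' = false := by simpa using h
    rw [h1, h2]

-- Nat-level characterization of the window test
theorem cutB_iff (u : List Char) (j : Nat) :
    cutB u (j : Int) = true ↔
      2 ≤ j ∧ j + 2 ≤ u.length ∧ ('-' ∉ (u.drop (j - 2)).take 4) ∧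
      (j = 2 ∨ u[j - 3]? = some '-') ∧ (j + 2 = u.length ∨ u[j + 2]? = some '-') := by
  unfold cutB
  by_cases h2 : 2 ≤ j
  · simp only [Bool.and_eq_true, Bool.or_eq_true, Bool.not_eq_true', decide_eq_true_eq,
      beq_iff_eq]
    have e1 : ((j : Int) - 2) = ((j - 2 : Nat) : Int) := by omega
    have e2 : ((j : Int) + 2) = ((j + 2 : Nat) : Int) := by omega
    rw [e1, e2, PySem.List.slice_natCast, (by omega : (j + 2) - (j - 2) = 4), isIn_single]
    constructor
    · rintro ⟨⟨⟨⟨-, hlen⟩, hnd⟩, hstart⟩, hend⟩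
      refine ⟨h2, by exact_mod_cast hlen, by simpa using hnd, ?_, ?_⟩
      · rcases hstart with h | h
        · left; exact_mod_cast h
        · by_cases h3 : j = 2
          · exact Or.inl h3
          · right
            have e5 : ((j : Int) - 3) = ((j - 3 : Nat) : Int) := by omega
            rw [e5, PySem.List.pyGet?_natCast] at h
            exact h
      · rcases hend with h | h
        · left; exact_mod_cast h
        · right
          rw [PySem.List.pyGet?_natCast] at h
          exact h
    · rintro ⟨-, hlen, hnd, hstart, hend⟩
      refine ⟨⟨⟨⟨by exact_mod_cast h2, by exact_mod_cast hlen⟩, by simpa using hnd⟩, ?_⟩, ?_⟩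
      · rcases hstart with h | h
        · left; exact_mod_cast h
        · by_cases h3 : j = 2
          · left; exact_mod_cast h3
          · right
            have e5 : ((j : Int) - 3) = ((j - 3 : Nat) : Int) := by omega
            rw [e5, PySem.List.pyGet?_natCast]; exact h
      · rcases hend with h | h
        · left; exact_mod_cast h
        · right
          rw [PySem.List.pyGet?_natCast]; exact h
  · have hI : ¬ (2 ≤ (j : Int)) := by exact_mod_cast h2
    simp [hI, h2]

theorem mem_window {u : List Char} {a i : Nat} (ha : a ≤ i) (hi : i < a + 4)
    (hc : u[i]? = some '-') : '-' ∈ (u.drop a).take 4 := by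
  obtain ⟨hl, hc⟩ := List.getElem?_eq_some_iff.mp hc
  have hlen : i - a < ((u.drop a).take 4).length := by
    simp only [List.length_take, List.length_drop]
    omega
  have hget : ((u.drop a).take 4)[i - a]'hlen = '-' := by
    rw [List.getElem_take, List.getElem_drop]
    have : a + (i - a) = i := by omega
    simp [this, hc]
  exact hget ▸ List.getElem_mem hlen

theorem cut_nodash (u : List Char) (hnd : '-' ∉ u) (j : Nat) (_hj : j < u.length) :
    cutB u (j : Int) = (decide (u.length = 4) && decide (j = 2)) := by
  by_cases hc : u.length = 4 ∧ j = 2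
  · obtain ⟨h4, hj2⟩ := hc
    have ht : cutB u (j : Int) = true := by
      refine (cutB_iff u j).mpr ⟨by omega, by omega, ?_, Or.inl hj2, Or.inl (by omega)⟩
      intro hmem
      exact hnd (List.mem_of_mem_take hmem |> fun h => List.mem_of_mem_drop h)
    rw [ht]; simp [h4, hj2]
  · have hf : cutB u (j : Int) = false := by
      rw [Bool.eq_false_iff]
      intro htrue
      obtain ⟨hj2, hlen, hnd4, hstart, hend⟩ := (cutB_iff u j).mp htrue
      have hjeq : j = 2 := by
        rcases hstart with h | h
        · exact h
        · exact absurd (List.mem_of_getElem? h) hnd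
      rcases hend with h | h
      · exact hc ⟨by omega, hjeq⟩
      · exact hnd (List.mem_of_getElem? h)
    rw [hf]
    by_cases h4 : u.length = 4 <;> by_cases hj2 : j = 2 <;> simp_all

theorem cut_head (b r : List Char) (hb : '-' ∉ b) (j : Nat) (hj : j < b.length) :
    cutB (b ++ '-' :: r) (j : Int) = (decide (b.length = 4) && decide (j = 2)) := by
  have hlen : (b ++ '-' :: r).length = b.length + r.length + 1 := by simp; omega
  have hsep : (b ++ '-' :: r)[b.length]? = some '-' := by
    rw [List.getElem?_append_right (le_refl _)]; simp
  by_cases hc : b.length = 4 ∧ j = 2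
  · obtain ⟨h4, hj2⟩ := hc
    have ht : cutB (b ++ '-' :: r) (j : Int) = true := by
      refine (cutB_iff _ j).mpr ⟨by omega, by omega, ?_, Or.inl hj2, Or.inr ?_⟩
      · have htk : ((b ++ '-' :: r).drop (j - 2)).take 4 = b := by
          rw [hj2]; simp only [Nat.sub_self, List.drop_zero]
          rw [← h4, List.take_left]
        rw [htk]; exact hb
      · rw [(by omega : j + 2 = b.length)]; exact hsep
    rw [ht]; simp [h4, hj2]
  · have hf : cutB (b ++ '-' :: r) (j : Int) = false := by
      rw [Bool.eq_false_iff]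
      intro htrue
      obtain ⟨hj2, hlen2, hnd4, hstart, hend⟩ := (cutB_iff _ j).mp htrue
      have hjeq : j = 2 := by
        rcases hstart with h | h
        · exact h
        · have hlt : j - 3 < b.length := by omega
          rw [List.getElem?_append_left hlt] at h
          exact absurd (List.mem_of_getElem? h) hb
      subst hjeq
      have hm3 : 3 ≤ b.length := by omega
      have hwin : '-' ∈ ((b ++ '-' :: r).drop (2 - 2)).take 4 → False := fun h => hnd4 h
      rcases hend with h | h
      · -- j + 2 = total length: forces b.length = 3, dash at index 3 inside window
        have hb3 : b.length = 3 := by omega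
        exact hwin (mem_window (a := 2 - 2) (i := b.length) (by omega) (by omega) hsep)
      · -- (b ++ '-' :: r)[4]? = '-'
        rcases Nat.lt_trichotomy 4 b.length with h4 | h4 | h4
        · rw [List.getElem?_append_left (by omega : 2 + 2 < b.length)] at h
          exact absurd (List.mem_of_getElem? h) hb
        · exact hc ⟨h4.symm, rfl⟩
        · have hb3 : b.length = 3 := by omega
          exact hwin (mem_window (a := 2 - 2) (i := b.length) (by omega) (by omega) hsep)
    rw [hf]
    by_cases h4 : b.length = 4 <;> by_cases hj2 : j = 2 <;> simp_all

theorem cut_sep (b r : List Char) :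
    cutB (b ++ '-' :: r) (b.length : Int) = false := by
  rw [Bool.eq_false_iff]
  intro htrue
  obtain ⟨hj2, hlen2, hnd4, hstart, hend⟩ := (cutB_iff _ b.length).mp htrue
  have hsep : (b ++ '-' :: r)[b.length]? = some '-' := by
    rw [List.getElem?_append_right (le_refl _)]; simp
  exact hnd4 (mem_window (by omega) (by omega) hsep)

theorem cut_shift (b r : List Char) (j : Nat) (hj : j < r.length) :
    cutB (b ++ '-' :: r) ((b.length + 1 + j : Nat) : Int) = cutB r (j : Int) := by
  have hlen : (b ++ '-' :: r).length = b.length + r.length + 1 := by simp; omega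
  have hsep : (b ++ '-' :: r)[b.length]? = some '-' := by
    rw [List.getElem?_append_right (le_refl _)]; simp
  have gshift : ∀ i : Nat, (b ++ '-' :: r)[b.length + 1 + i]? = r[i]? := by
    intro i
    rw [List.append_cons, List.getElem?_append_right
      (by simp only [List.length_append, List.length_cons, List.length_nil]; omega)]
    congr 1; simp
  have dshift : ∀ i : Nat, (b ++ '-' :: r).drop (b.length + 1 + i) = r.drop i := by
    intro i
    rw [List.append_cons,
      show b.length + 1 + i = (b ++ ['-']).length + i by simp, List.drop_append]
    simp
  by_cases hj2 : 2 ≤ j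
  · have hiff : cutB (b ++ '-' :: r) ((b.length + 1 + j : Nat) : Int) = true
        ↔ cutB r (j : Int) = true := by
      rw [cutB_iff, cutB_iff]
      constructor
      · rintro ⟨-, hl, hnd4, hstart, hend⟩
        refine ⟨hj2, by omega, ?_, ?_, ?_⟩
        · rw [(by omega : b.length + 1 + j - 2 = b.length + 1 + (j - 2)), dshift] at hnd4
          exact hnd4
        · by_cases h3 : j = 2
          · exact Or.inl h3
          · rcases hstart with h | h
            · omega
            · right
              rw [(by omega : b.length + 1 + j - 3 = b.length + 1 + (j - 3)), gshift] at h
              exact h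
        · rcases hend with h | h
          · exact Or.inl (by omega)
          · right
            rw [(by omega : b.length + 1 + j + 2 = b.length + 1 + (j + 2)), gshift] at h
            exact h
      · rintro ⟨-, hl, hnd4, hstart, hend⟩
        refine ⟨by omega, by omega, ?_, ?_, ?_⟩
        · rw [(by omega : b.length + 1 + j - 2 = b.length + 1 + (j - 2)), dshift]
          exact hnd4
        · right
          by_cases h3 : j = 2
          · obtain rfl := h3
            rw [(by omega : b.length + 1 + 2 - 3 = b.length)]
            exact hsep
          · rcases hstart with h | h
            · exact absurd h h3
            · rw [(by omega : b.length + 1 + j - 3 = b.length + 1 + (j - 3)), gshift]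
              exact h
        · rcases hend with h | h
          · exact Or.inl (by omega)
          · right
            rw [(by omega : b.length + 1 + j + 2 = b.length + 1 + (j + 2)), gshift]
            exact h
    cases hrb : cutB r (j : Int) with
    | true => exact hiff.mpr hrb
    | false =>
      rw [Bool.eq_false_iff]
      intro htrue
      exact absurd (hiff.mp htrue) (by simp [hrb])

  · have hLf : cutB (b ++ '-' :: r) ((b.length + 1 + j : Nat) : Int) = false := by
      rw [Bool.eq_false_iff]
      intro htrue
      obtain ⟨-, hl, hnd4, -, -⟩ := (cutB_iff _ _).mp htrue
      exact hnd4 (mem_window (by omega) (by omega) hsep)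
    have hRf : cutB r (j : Int) = false := by
      rw [Bool.eq_false_iff]
      intro htrue
      obtain ⟨h2, -, -, -, -⟩ := (cutB_iff _ _).mp htrue
      exact hj2 h2
    rw [hLf, hRf]

theorem flat_getD (u : List Char) :
    (List.range u.length).flatMap (fun j => [u.getD j ' ']) = u := by
  rw [← List.map_eq_flatMap]
  apply List.ext_getElem
  · simp
  · intro i h1 h2
    simp [List.getD_eq_getElem?_getD, List.getElem?_eq_getElem h2]

theorem wp_nodash (u : List Char) (hnd : '-' ∉ u) :
    wp u = joinD ((spl u).flatMap step4) := by
  rw [spl_no_dash u hnd]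
  simp only [List.flatMap_cons, List.flatMap_nil, List.append_nil]
  rw [joinD_step4]
  by_cases h4 : u.length = 4
  · rw [if_pos h4]
    rcases u with _ | ⟨a, u⟩; · simp at h4
    rcases u with _ | ⟨b2, u⟩; · simp at h4
    rcases u with _ | ⟨c2, u⟩; · simp at h4
    rcases u with _ | ⟨d2, u⟩; · simp at h4
    rcases u with _ | ⟨e2, u⟩
    swap; · simp at h4
    have hc0 := cut_nodash _ hnd 0 (by simp)
    have hc1 := cut_nodash _ hnd 1 (by simp)
    have hc2 := cut_nodash _ hnd 2 (by simp)
    have hc3 := cut_nodash _ hnd 3 (by simp)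
    norm_num at hc0 hc1 hc2 hc3
    unfold wp
    simp [List.range_succ, hc0, hc1, hc2, hc3, List.getD]
  · rw [if_neg h4]
    unfold wp
    rw [List.flatMap_congr (g := fun j => [u.getD j ' ']) ?_, flat_getD]
    intro j hj
    rw [List.mem_range] at hj
    rw [cut_nodash u hnd j hj]
    simp [h4]

theorem wp_decomp (b r : List Char) (hb : '-' ∉ b) :
    wp (b ++ '-' :: r)
      = (if b.length = 4 then b.take 2 ++ '-' :: b.drop 2 else b) ++ '-' :: wp r := by
  have hsep : (b ++ '-' :: r)[b.length]? = some '-' := by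
    rw [List.getElem?_append_right (le_refl _)]; simp
  have gshift : ∀ i : Nat, (b ++ '-' :: r)[b.length + 1 + i]? = r[i]? := by
    intro i
    rw [List.append_cons, List.getElem?_append_right
      (by simp only [List.length_append, List.length_cons, List.length_nil]; omega)]
    congr 1; simp
  have hlen : (b ++ '-' :: r).length = (b.length + 1) + r.length := by simp; omega
  unfold wp
  rw [hlen, List.range_add, List.flatMap_append, List.range_succ, List.flatMap_append]
  have hP2 : [b.length].flatMap
      (fun (j : Nat) => (if cutB (b ++ '-' :: r) (j : Int) then ['-'] else [])
        ++ [(b ++ '-' :: r).getD j ' ']) = ['-'] := by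
    simp only [List.flatMap_cons, List.flatMap_nil, List.append_nil]
    rw [cut_sep b r]
    simp [List.getD_eq_getElem?_getD]
  have hP3 : ((List.range r.length).map (fun x => b.length + 1 + x)).flatMap
      (fun (j : Nat) => (if cutB (b ++ '-' :: r) (j : Int) then ['-'] else [])
        ++ [(b ++ '-' :: r).getD j ' ']) = wp r := by
    rw [List.flatMap_map]
    apply List.flatMap_congr
    intro j hj
    rw [List.mem_range] at hj
    rw [cut_shift b r j hj]
    have : (b ++ '-' :: r).getD (b.length + 1 + j) ' ' = r.getD j ' ' := by
      rw [List.getD_eq_getElem?_getD, gshift j, List.getD_eq_getElem?_getD]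
    rw [this]
  have hP1 : (List.range b.length).flatMap
      (fun (j : Nat) => (if cutB (b ++ '-' :: r) (j : Int) then ['-'] else [])
        ++ [(b ++ '-' :: r).getD j ' '])
      = (if b.length = 4 then b.take 2 ++ '-' :: b.drop 2 else b) := by
    by_cases h4 : b.length = 4
    · rw [if_pos h4]
      rcases b with _ | ⟨a1, b⟩; · simp at h4
      rcases b with _ | ⟨a2, b⟩; · simp at h4
      rcases b with _ | ⟨a3, b⟩; · simp at h4
      rcases b with _ | ⟨a4, b⟩; · simp at h4
      rcases b with _ | ⟨a5, b⟩
      swap; · simp at h4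
      have hc0 := cut_head _ r hb 0 (by simp)
      have hc1 := cut_head _ r hb 1 (by simp)
      have hc2 := cut_head _ r hb 2 (by simp)
      have hc3 := cut_head _ r hb 3 (by simp)
      norm_num at hc0 hc1 hc2 hc3
      simp [List.range_succ, hc0, hc1, hc2, hc3, List.getD]
    · rw [if_neg h4]
      rw [List.flatMap_congr (g := fun j => [b.getD j ' ']) ?_, flat_getD]
      intro j hj
      rw [List.mem_range] at hj
      rw [cut_head b r hb j hj]
      simp [h4, List.getD_eq_getElem?_getD, List.getElem?_append_left hj]
  rw [hP1, hP2, hP3]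
  simp [wp, List.getD_eq_getElem?_getD]

theorem dropWhile_head_false {α : Type} (p : α → Bool) (l : List α) (c : α) (rest : List α)
    (h : l.dropWhile p = c :: rest) : p c = false := by
  induction l with
  | nil => simp at h
  | cons a t ih =>
    by_cases hpa : p a
    · rw [List.dropWhile_cons_of_pos hpa] at h
      exact ih h
    · rw [List.dropWhile_cons_of_neg hpa] at h
      obtain ⟨rfl, -⟩ := List.cons.injEq .. ▸ h
      simpa using hpa

theorem main_eq (u : List Char) : joinD ((spl u).flatMap step4) = wp u := by
  have H : ∀ n (u : List Char), u.length ≤ n →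
      joinD ((spl u).flatMap step4) = wp u := by
    intro n
    induction n with
    | zero =>
      intro u hu
      have hnil : u = [] := by cases u with | nil => rfl | cons a t => simp at hu
      subst hnil
      exact (wp_nodash [] (by simp)).symm
    | succ n ih =>
      intro u hu
      have hsplit := List.takeWhile_append_dropWhile (p := fun c => !(c == '-')) (l := u)
      cases hd : u.dropWhile (fun c => !(c == '-')) with
      | nil =>
        have hnd : '-' ∉ u := by
          intro hm
          have := List.dropWhile_eq_nil_iff.mp hd '-' hm
          simp at this
        exact (wp_nodash u hnd).symm
      | cons c rest =>
        have hc : c = '-' := by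
          have h2 := dropWhile_head_false (fun c => !(c == '-')) u c rest hd
          simpa using h2
        subst hc
        have hbnd : '-' ∉ u.takeWhile (fun c => !(c == '-')) := by
          intro hm
          have := List.mem_takeWhile_imp hm
          simp at this
        have hu2 : u = u.takeWhile (fun c => !(c == '-')) ++ '-' :: rest := by
          rw [hd] at hsplit
          exact hsplit.symm
        have hrest : rest.length ≤ n := by
          have := congrArg List.length hu2
          simp only [List.length_append, List.length_cons] at this
          omega
        rw [hu2, spl_append_sep _ rest hbnd, List.flatMap_cons,
            joinD_append _ _ (step4_ne_nil _) (flat_spl_ne_nil rest),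
            joinD_step4, wp_decomp _ rest hbnd, ih rest hrest]
  exact H u.length u (le_refl _)

-- ===== VERDICT (by name: the statement is the Claim_ definition above) =====
theorem dashLicensePlate_spec : Claim_equal_dashLicensePlate := by
  intro s _
  unfold Spec_dashLicensePlate
  rcases h : s.toList with _ | ⟨c0, rest⟩
  · unfold dashLicensePlate dashLicensePlate_alt
    rw [h]
    simp only [List.foldl_nil]
    rw [show PySem.Chars.stripChars [] ['-'] = [] from rfl, splitOn_dash, foldl_parts,
      joinD_eq_join]
    rfl
  · unfold dashLicensePlate dashLicensePlate_alt
    rw [h]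
    simp only [List.foldl_cons]
    have hstep0 : stepA ([], none) c0 = (['-', c0], some (PySem.Chars.isdigit c0)) := by
      simp [stepA]
    rw [hstep0, foldlA rest ['-', c0] (PySem.Chars.isdigit c0)]
    simp only
    rw [zip_join rest c0]
    rw [show (['-', c0] ++ ext (PySem.Chars.isdigit c0) rest)
          = '-' :: (c0 :: ext (PySem.Chars.isdigit c0) rest) from rfl]
    rw [strip_dash_cons]
    set u := PySem.Chars.stripChars (c0 :: ext (PySem.Chars.isdigit c0) rest) ['-'] with hu
    rw [splitOn_dash, foldl_parts, joinD_eq_join, main_eq]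
    congr 1
    rw [PySem.List.pyRange_zero_natCast, List.foldl_map]
    have hfun : (fun (out : List Char) (k : Nat) =>
          (if cutB u ((k : Nat) : Int) then out ++ ['-'] else out)
            ++ [PySem.List.pyGetD u ((k : Nat) : Int) ' '])
        = fun (out : List Char) (k : Nat) =>
            out ++ ((if cutB u ((k : Nat) : Int) then ['-'] else []) ++ [u.getD k ' ']) := by
      funext out k
      by_cases hcut : cutB u ((k : Nat) : Int) <;> simp [hcut]
    rw [hfun, PySem.List.foldl_append_eq_flatMap]
    simp [wp]
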